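-- pv_equiv track=rewrite | github.com/rdshuvalov-pixel/prometei | prometheus_agent/vacancy_llm.py | _derive_fit_reasoning_from_cover
-- ===== SOURCE A (Python) =====
-- def _derive_fit_reasoning_from_cover(cover: str) -> str | None:
--     s = (cover or "").strip()
--     if not s:
--         return None
--     # Cheap fallback: take first 2 sentences (or first 240 chars).
--     parts: list[str] = []
--     buf = ""
--     for ch in s:
--         buf += ch
--         if ch in ".!?":
--             p = buf.strip()
--             if p:
--                 parts.append(p)
--             buf = ""
--         if len(parts) >= 2:
--             break
--         if len("".join(parts)) >= 260:
--             break
--     out = " ".join(parts).strip()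
--     if out:
--         return out[:600]
--     return s[:240]
-- ===== SOURCE B (Python) =====
-- _TERMS = ".!?"
--
--
-- def _first_stop(text):
--     """Index of the first sentence terminator in text, or None."""
--     return next((i for i, ch in enumerate(text) if ch in _TERMS), None)
--
--
-- def _derive_fit_reasoning_from_cover(cover):
--     s = (cover or "").strip()
--     if not s:
--         return None
--     # Jump terminator-to-terminator and slice out whole sentences,
--     # instead of growing a per-character buffer.
--     parts = []
--     rest = s
--     while len(parts) < 2:
--         i = _first_stop(rest)
--         if i is None:
--             break
--         parts.append(rest[: i + 1].strip())
--         rest = rest[i + 1:]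
--         if len(parts) == 1 and len(parts[0]) >= 260:
--             break
--     out = " ".join(parts)
--     return out[:600] if out else s[:240]
-- ===== Notes on version B (the rewrite author's own statement) =====
-- stated objective: alternative
-- what changed: Replaces the per-character buffer-growing scan with break logic by a sentence-slicing loop that jumps to the next terminator index and slices whole sentence chunks out of the remaining string.
import Mathlib
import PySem

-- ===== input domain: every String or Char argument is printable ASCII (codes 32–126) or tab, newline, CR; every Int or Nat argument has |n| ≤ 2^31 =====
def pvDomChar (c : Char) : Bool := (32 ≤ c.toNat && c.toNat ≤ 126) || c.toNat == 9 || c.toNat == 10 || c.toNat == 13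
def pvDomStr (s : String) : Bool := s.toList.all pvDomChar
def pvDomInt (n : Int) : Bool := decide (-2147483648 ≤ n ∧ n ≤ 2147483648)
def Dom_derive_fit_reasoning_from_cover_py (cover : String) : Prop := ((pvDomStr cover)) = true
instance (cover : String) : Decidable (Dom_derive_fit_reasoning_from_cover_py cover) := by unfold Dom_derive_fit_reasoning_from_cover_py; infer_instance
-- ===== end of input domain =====

-- B replaces A's per-character buffer scan with a jump-to-next-terminator sentence-slicing
-- loop; same return value (alternative decomposition, no speed claim).

-- 'ch in ".!?"' (shared trivial predicate of both sources)
def pvTerm (c : Char) : Bool := c == '.' || c == '!' || c == '?'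

-- ===== PORT A =====
-- A's for-loop over characters with state (parts, buf) and the two 'break's
def pvLoopA : List Char → List (List Char) → List Char → List (List Char)
  | [], parts, _ => parts
  | c :: rest, parts, buf =>
    let buf1 := buf ++ [c]
    let parts1 := if pvTerm c then
        (let p := PySem.Chars.strip buf1
         if p ≠ [] then parts ++ [p] else parts)
      else parts
    let buf2 := if pvTerm c then [] else buf1
    if parts1.length ≥ 2 then parts1
    else if (PySem.Chars.join [] parts1).length ≥ 260 then parts1
    else pvLoopA rest parts1 buf2

def derive_fit_reasoning_from_cover_py (cover : String) : Option String :=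
  let s := PySem.Chars.strip cover.toList
  if s = [] then none
  else
    let parts := pvLoopA s [] []
    let out := PySem.Chars.strip (PySem.Chars.join [' '] parts)
    if out ≠ [] then some (String.ofList (PySem.List.slice out none (some 600)))
    else some (String.ofList (PySem.List.slice s none (some 240)))

-- ===== PORT B =====
-- Source B's _first_stop: index of first terminator, or None
def pvFirstStop (text : List Char) : Option Nat := text.findIdx? pvTerm

-- Source B's while-loop: slice whole sentences off the front of `rest`
def pvLoopB (rest : List Char) (parts : List (List Char)) : List (List Char) :=
  if parts.length < 2 then
    match h : pvFirstStop rest with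
    | none => parts
    | some i =>
      if (parts ++ [PySem.Chars.strip (rest.take (i + 1))]).length = 1 ∧
         260 ≤ (parts ++ [PySem.Chars.strip (rest.take (i + 1))]).headI.length then
        parts ++ [PySem.Chars.strip (rest.take (i + 1))]
      else pvLoopB (rest.drop (i + 1)) (parts ++ [PySem.Chars.strip (rest.take (i + 1))])
  else parts
termination_by rest.length
decreasing_by
  have : i < rest.length := by
    have := List.findIdx?_eq_some_iff_findIdx_eq.mp h
    omega
  simp [List.length_drop]; omega

def derive_fit_reasoning_from_cover_py_alt (cover : String) : Option String :=
  let s := PySem.Chars.strip cover.toList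
  if s = [] then none
  else
    let parts := pvLoopB s []
    let out := PySem.Chars.join [' '] parts
    if out ≠ [] then some (String.ofList (PySem.List.slice out none (some 600)))
    else some (String.ofList (PySem.List.slice s none (some 240)))

-- ===== PRECONDITION & SPEC =====
def Spec_derive_fit_reasoning_from_cover_py (cover : String) (out : Option String) : Prop := out = derive_fit_reasoning_from_cover_py_alt cover
instance (cover : String) (out : Option String) : Decidable (Spec_derive_fit_reasoning_from_cover_py cover out) := by unfold Spec_derive_fit_reasoning_from_cover_py; infer_instance

-- ===== CLAIM (what is proved, stated in full; the proofs are below) =====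
def Claim_equal_derive_fit_reasoning_from_cover_py : Prop := ∀ (cover : String), Dom_derive_fit_reasoning_from_cover_py cover → Spec_derive_fit_reasoning_from_cover_py cover (derive_fit_reasoning_from_cover_py cover)

-- ===== LEMMAS AND PROOFS =====

lemma pvTerm_not_space {c : Char} (h : pvTerm c = true) : PySem.Chars.isspace c = false := by
  simp only [pvTerm, Bool.or_eq_true, beq_iff_eq] at h
  rcases h with (h | h) | h <;> subst h <;> decide

lemma dropWhile_snoc_not {c : Char} (hc : PySem.Chars.isspace c = false) (buf : List Char) :
    List.dropWhile PySem.Chars.isspace (buf ++ [c]) =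
      buf.dropWhile PySem.Chars.isspace ++ [c] := by
  induction buf with
  | nil => simp [List.dropWhile, hc]
  | cons a t iht => by_cases ha : PySem.Chars.isspace a <;> simp [List.dropWhile, ha, iht]

lemma rstrip_snoc_not {c : Char} (hc : PySem.Chars.isspace c = false) (l : List Char) :
    PySem.Chars.rstrip (l ++ [c]) = l ++ [c] := by
  simp [PySem.Chars.rstrip, hc]

-- strip of a chunk ending in a terminator: closed form
lemma strip_snoc_term {buf : List Char} {c : Char} (hc : pvTerm c = true) :
    PySem.Chars.strip (buf ++ [c]) = buf.dropWhile PySem.Chars.isspace ++ [c] := by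
  have hcs := pvTerm_not_space hc
  simp [PySem.Chars.strip, PySem.Chars.lstrip, dropWhile_snoc_not hcs, rstrip_snoc_not hcs]

lemma strip_snoc_term_ne_nil {buf : List Char} {c : Char} (hc : pvTerm c = true) :
    PySem.Chars.strip (buf ++ [c]) ≠ [] := by
  simp [strip_snoc_term hc]

-- a chunk's ends are non-space
def pvGood (p : List Char) : Prop :=
  p ≠ [] ∧ PySem.Chars.isspace p.headI = false ∧ PySem.Chars.isspace (p.getLastD '.') = false

lemma good_chunk {buf : List Char} {c : Char} (hc : pvTerm c = true) :
    pvGood (PySem.Chars.strip (buf ++ [c])) := by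
  have hcs := pvTerm_not_space hc
  rw [strip_snoc_term hc]
  refine ⟨by simp, ?_, ?_⟩
  · cases hd : buf.dropWhile PySem.Chars.isspace with
    | nil => simpa [hd] using hcs
    | cons h t =>
        have := List.head?_dropWhile_not PySem.Chars.isspace buf
        simp [hd] at this
        simpa [hd, List.headI] using this
  · simpa [List.getLastD_concat] using hcs

lemma good_strip_eq {p : List Char} (hp : pvGood p) : PySem.Chars.strip p = p := by
  obtain ⟨hne, hh, hl⟩ := hp
  have hrstrip : PySem.Chars.rstrip p = p := by
    rcases List.eq_nil_or_concat p with rfl | ⟨l, b, rfl⟩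
    · exact absurd rfl hne
    · simp only [List.concat_eq_append] at hl ⊢
      exact rstrip_snoc_not (by simpa [List.getLastD_concat] using hl) l
  cases p with
  | nil => exact absurd rfl hne
  | cons a t =>
    have hh' : PySem.Chars.isspace a = false := by simpa [List.headI] using hh
    have hlstrip : PySem.Chars.lstrip (a :: t) = a :: t := by
      simp [PySem.Chars.lstrip, List.dropWhile, hh']
    simp [PySem.Chars.strip, hlstrip, hrstrip]

-- the main loop correspondence
lemma loopA_eq_loopB : ∀ (rest buf : List Char) (parts : List (List Char)),
    (∀ c ∈ buf, pvTerm c = false) →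
    parts.length < 2 → (PySem.Chars.join [] parts).length < 260 →
    pvLoopA rest parts buf = pvLoopB (buf ++ rest) parts := by
  intro rest
  induction rest with
  | nil =>
    intro buf parts hbuf hlen _
    have hfs : pvFirstStop (buf ++ []) = none := by
      simp only [pvFirstStop, List.findIdx?_eq_none_iff, List.append_nil]
      exact hbuf
    rw [pvLoopA, pvLoopB, if_pos hlen]
    split
    · rfl
    · next i heq => rw [hfs] at heq; cases heq
  | cons c rest ih =>
    intro buf parts hbuf hlen hjoin
    by_cases hc : pvTerm c = true
    · -- terminator: a sentence chunk is completed
      have hchunk := strip_snoc_term_ne_nil (buf := buf) hc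
      have h1 : buf.findIdx? pvTerm = none := List.findIdx?_eq_none_iff.mpr hbuf
      have hfs : pvFirstStop (buf ++ c :: rest) = some buf.length := by
        simp [pvFirstStop, List.findIdx?_append, h1, List.findIdx?_cons, hc]
      have htake : (buf ++ c :: rest).take (buf.length + 1) = buf ++ [c] := by
        simp [List.take_append]
      have hdrop : (buf ++ c :: rest).drop (buf.length + 1) = rest := by
        simp [List.drop_append]
      set p := PySem.Chars.strip (buf ++ [c]) with hp
      have hR : pvLoopB (buf ++ c :: rest) parts =
          (if (parts ++ [p]).length = 1 ∧ 260 ≤ (parts ++ [p]).headI.length then parts ++ [p]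
           else pvLoopB rest (parts ++ [p])) := by
        rw [pvLoopB, if_pos hlen]
        split
        · next heq => rw [hfs] at heq; cases heq
        · next i heq =>
            rw [hfs] at heq
            injection heq with heq
            subst heq
            rw [htake, hdrop]
      have hL : pvLoopA (c :: rest) parts buf =
          (if (parts ++ [p]).length ≥ 2 then parts ++ [p]
           else if (PySem.Chars.join [] (parts ++ [p])).length ≥ 260 then parts ++ [p]
           else pvLoopA rest (parts ++ [p]) []) := by
        rw [pvLoopA]
        simp only [hc, if_true, ← hp, if_pos hchunk]
      rw [hL, hR]
      match parts, hlen with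
      | [], _ =>
        -- first sentence: both sides apply the 260 test to it
        have hj : PySem.Chars.join [] [p] = p := PySem.Chars.join_singleton [] p
        simp only [List.nil_append, List.length_cons, List.length_nil, hj, List.headI]
        by_cases h260 : 260 ≤ p.length
        · rw [if_neg (by omega), if_pos (by omega), if_pos (by simp [h260])]
        · rw [if_neg (by omega), if_neg (by omega), if_neg (by simp [h260])]
          simpa using ih [] [p] (by simp) (by simp)
            (by simpa [hj] using (by omega : p.length < 260))
      | [q], _ =>
        -- second sentence: both sides stop at two parts
        rw [if_pos (by simp), if_neg (by simp)]
        rw [pvLoopB, if_neg (by simp)]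
    · -- not a terminator: A extends buf, B's slice indices shift by one
      have hc' : pvTerm c = false := by simpa using hc
      have hstep : pvLoopA (c :: rest) parts buf = pvLoopA rest parts (buf ++ [c]) := by
        rw [pvLoopA]
        simp only [hc', if_false, Bool.false_eq_true]
        rw [if_neg (by omega), if_neg (by omega)]
      rw [hstep, ih (buf ++ [c]) parts
            (by intro a ha
                rcases List.mem_append.mp ha with h | h
                · exact hbuf a h
                · simp at h; simpa [h] using hc')
            hlen hjoin]
      simp

-- the chunk B slices out ends in its terminator, hence is 'good'
lemma take_chunk_good {rest : List Char} {i : Nat} (h : pvFirstStop rest = some i) :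
    pvGood (PySem.Chars.strip (rest.take (i + 1))) := by
  simp only [pvFirstStop] at h
  have h2 := List.findIdx?_eq_some_iff_findIdx_eq.mp h
  have hi : i < rest.length := h2.1
  have hterm : pvTerm rest[i] = true := by
    have h3 := List.findIdx_getElem (p := pvTerm) (xs := rest) (w := by rw [h2.2]; exact hi)
    simp_rw [h2.2] at h3; exact h3
  have ht : rest.take (i + 1) = rest.take i ++ [rest[i]] := by
    rw [List.take_add_one]; simp [List.getElem?_eq_getElem hi]
  rw [ht]; exact good_chunk hterm

-- B's loop yields at most two parts, all of them 'good' (fuel n bounds the recursion depth)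
lemma loopB_good_len : ∀ (n : Nat) (rest : List Char), rest.length ≤ n → ∀ (parts : List (List Char)),
    parts.length ≤ 2 → (∀ p ∈ parts, pvGood p) →
    (pvLoopB rest parts).length ≤ 2 ∧ ∀ p ∈ pvLoopB rest parts, pvGood p := by
  intro n
  induction n with
  | zero =>
    intro rest hr parts hlen hgood
    have : rest = [] := List.eq_nil_of_length_eq_zero (by omega)
    subst this
    rw [pvLoopB]
    split_ifs with hlt
    · split
      · exact ⟨hlen, hgood⟩
      · next i heq => simp [pvFirstStop] at heq
    · exact ⟨hlen, hgood⟩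
  | succ n ihn =>
    intro rest hr parts hlen hgood
    rw [pvLoopB]
    split_ifs with hlt
    · split
      · exact ⟨hlen, hgood⟩
      · next i heq =>
          have hgood1 : ∀ p ∈ parts ++ [PySem.Chars.strip (rest.take (i + 1))], pvGood p := by
            intro p hp
            rcases List.mem_append.mp hp with hp | hp
            · exact hgood p hp
            · simp at hp; subst hp; exact take_chunk_good heq
          have hlen1 : (parts ++ [PySem.Chars.strip (rest.take (i + 1))]).length ≤ 2 := by
            simp only [List.length_append, List.length_cons, List.length_nil]; omega
          split_ifs with hcond
          · exact ⟨hlen1, hgood1⟩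
          · refine ihn _ ?_ _ hlen1 hgood1
            have hi : i < rest.length :=
              (List.findIdx?_eq_some_iff_findIdx_eq.mp (by simpa [pvFirstStop] using heq)).1
            simp only [List.length_drop]; omega
    · exact ⟨hlen, hgood⟩

-- 'strip' is the identity on the space-joined result of at most two good parts
lemma strip_join_good {parts : List (List Char)}
    (hlen : parts.length ≤ 2) (hgood : ∀ p ∈ parts, pvGood p) :
    PySem.Chars.strip (PySem.Chars.join [' '] parts) = PySem.Chars.join [' '] parts := by
  match parts, hlen with
  | [], _ => decide
  | [p], _ =>
    rw [PySem.Chars.join_singleton]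
    exact good_strip_eq (hgood p (by simp))
  | [p, q], _ =>
    have hp := hgood p (by simp)
    have hq := hgood q (by simp)
    have hj : PySem.Chars.join [' '] [p, q] = p ++ ' ' :: q := by
      rw [PySem.Chars.join_cons_cons, PySem.Chars.join_singleton]; simp
    rw [hj]
    apply good_strip_eq
    obtain ⟨hpne, hph, -⟩ := hp
    obtain ⟨hqne, -, hql⟩ := hq
    refine ⟨by simp, ?_, ?_⟩
    · cases p with
      | nil => exact absurd rfl hpne
      | cons a t => simpa [List.headI] using hph
    · have hlast : (p ++ ' ' :: q).getLastD '.' = q.getLastD '.' := by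
        cases q with
        | nil => exact absurd rfl hqne
        | cons b t =>
          rw [List.getLastD_eq_getLast?, List.getLastD_eq_getLast?, List.getLast?_append]
          simp [List.getLast?_cons]
      rw [hlast]; exact hql

-- ===== VERDICT (by name: the statement is the Claim_ definition above) =====
theorem derive_fit_reasoning_from_cover_py_spec : Claim_equal_derive_fit_reasoning_from_cover_py := by
  intro cover _
  unfold Spec_derive_fit_reasoning_from_cover_py
  unfold derive_fit_reasoning_from_cover_py derive_fit_reasoning_from_cover_py_alt
  set s := PySem.Chars.strip cover.toList with hs
  by_cases hnil : s = []
  · simp [hnil]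
  · have hloop : pvLoopA s [] [] = pvLoopB s [] := by
      simpa using loopA_eq_loopB s [] [] (by simp) (by simp) (by simp [PySem.Chars.join_nil])
    have hgl := loopB_good_len s.length s (by omega) [] (by simp) (by simp)
    rw [← hloop] at hgl
    have hstrip : PySem.Chars.strip (PySem.Chars.join [' '] (pvLoopA s [] [])) =
        PySem.Chars.join [' '] (pvLoopA s [] []) := strip_join_good hgl.1 hgl.2
    rw [if_neg hnil, if_neg hnil]
    rw [hloop] at hstrip
    simp only [hloop]
    rw [hstrip]
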